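-- pv_equiv track=rewrite | github.com/GHLisz/algorithm-exercises | lintcode/956-data-segmentation.py | dataSegmentation
-- ===== SOURCE A (Python) =====
-- def dataSegmentation(str):
--     # Write your code here
--     ans, ins = [], ''
--
--     for c in str:
--         if c == " ":
--             if ins != "":
--                 ans.append(ins)
--             ins = ""
--         elif c.islower():
--             ins = ins + c
--         else:
--             if ins != "":
--                 ans.append(ins)
--             ans.append(c)
--             ins = ""
--     if ins != "":
--         ans.append(ins)
--     return ans
-- ===== SOURCE B (Python) =====
-- from itertools import groupby
--
-- def dataSegmentation(str):
--     ans = []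
--     for is_word, run in groupby(str, key=lambda c: c.islower()):
--         if is_word:
--             ans.append(''.join(run))
--         else:
--             ans.extend(c for c in run if c != ' ')
--     return ans
-- ===== Notes on version B (the rewrite author's own statement) =====
-- stated objective: idiomatic
-- what changed: Replaces A's character-at-a-time loop carrying an explicit word accumulator with itertools.groupby over the islower predicate: lowercase runs are joined into words and non-lowercase runs emit their non-space characters singly.
import Mathlib
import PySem

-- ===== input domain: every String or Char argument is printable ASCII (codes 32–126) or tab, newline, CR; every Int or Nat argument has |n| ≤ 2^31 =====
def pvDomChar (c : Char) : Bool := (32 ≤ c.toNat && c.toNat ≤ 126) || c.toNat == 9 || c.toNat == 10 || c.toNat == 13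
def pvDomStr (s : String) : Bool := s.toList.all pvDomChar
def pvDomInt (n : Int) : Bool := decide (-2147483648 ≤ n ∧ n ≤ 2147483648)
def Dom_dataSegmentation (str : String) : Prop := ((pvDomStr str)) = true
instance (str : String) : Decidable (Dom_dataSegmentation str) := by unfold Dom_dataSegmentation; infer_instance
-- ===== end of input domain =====

-- B rewrites A's single character-at-a-time accumulator loop as itertools.groupby over the
-- islower predicate: lowercase runs are joined into words, non-lowercase runs emit their
-- non-space characters singly (objective: idiomatic; same cost).

-- ===== PORT A =====
-- the body of A's for-loop, acting on the state (ans, ins); ins kept as List Char ('' = [])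
def stepA (st : List String × List Char) (c : Char) : List String × List Char :=
  if c = ' ' then
    (if st.2 ≠ [] then st.1 ++ [String.ofList st.2] else st.1, [])
  else if PySem.Chars.islower c then
    (st.1, st.2 ++ [c])
  else
    ((if st.2 ≠ [] then st.1 ++ [String.ofList st.2] else st.1) ++ [String.ofList [c]], [])

def dataSegmentation (str : String) : List String :=
  let st := str.toList.foldl stepA ([], [])
  if st.2 ≠ [] then st.1 ++ [String.ofList st.2] else st.1

-- ===== PORT B =====
-- itertools.groupby(str, key=islower): maximal runs of chars sharing the islower value
def pvGroups : List Char → List (Bool × List Char)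
  | [] => []
  | c :: rest =>
    let k := PySem.Chars.islower c
    (k, c :: rest.takeWhile (fun d => PySem.Chars.islower d == k)) ::
      pvGroups (rest.dropWhile (fun d => PySem.Chars.islower d == k))
termination_by l => l.length
decreasing_by
  have := List.length_dropWhile_le (fun d => PySem.Chars.islower d == PySem.Chars.islower c) rest
  simp; omega

-- what B appends for one group
def pvEmit (g : Bool × List Char) : List String :=
  if g.1 then [String.ofList g.2]
  else (g.2.filter (fun c => c ≠ ' ')).map (fun c => String.ofList [c])

def dataSegmentation_alt (str : String) : List String :=
  (pvGroups str.toList).flatMap pvEmit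

-- ===== PRECONDITION & SPEC =====
def Spec_dataSegmentation (str : String) (out : List String) : Prop := out = dataSegmentation_alt str
instance (str : String) (out : List String) : Decidable (Spec_dataSegmentation str out) := by unfold Spec_dataSegmentation; infer_instance

-- ===== CLAIM (what is proved, stated in full; the proofs are below) =====
def Claim_equal_dataSegmentation : Prop := ∀ (str : String), Dom_dataSegmentation str → Spec_dataSegmentation str (dataSegmentation str)

-- ===== LEMMAS AND PROOFS =====

-- 'if ins != "": ans.append(ins)' as a list
def flushA (ins : List Char) : List String := if ins ≠ [] then [String.ofList ins] else []

-- the output A will still produce from state ins on the remaining input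
def gSpec : List Char → List Char → List String
  | ins, [] => flushA ins
  | ins, c :: cs =>
    if c = ' ' then flushA ins ++ gSpec [] cs
    else if PySem.Chars.islower c then gSpec (ins ++ [c]) cs
    else flushA ins ++ [String.ofList [c]] ++ gSpec [] cs

theorem foldA_eq_gSpec (cs : List Char) : ∀ (ans : List String) (ins : List Char),
    (if (cs.foldl stepA (ans, ins)).2 ≠ [] then
        (cs.foldl stepA (ans, ins)).1 ++ [String.ofList (cs.foldl stepA (ans, ins)).2]
      else (cs.foldl stepA (ans, ins)).1) = ans ++ gSpec ins cs := by
  induction cs with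
  | nil =>
    intro ans ins
    simp only [List.foldl_nil, gSpec, flushA]
    split_ifs <;> simp
  | cons c cs ih =>
    intro ans ins
    simp only [List.foldl_cons]
    by_cases hsp : c = ' '
    · subst hsp
      rw [show stepA (ans, ins) ' ' = (ans ++ flushA ins, []) from by
        simp only [stepA, flushA]; split_ifs <;> simp]
      rw [ih]
      simp [gSpec]
    · by_cases hlo : PySem.Chars.islower c = true
      · rw [show stepA (ans, ins) c = (ans, ins ++ [c]) from by
          simp [stepA, hsp, hlo]]
        rw [ih, gSpec]
        simp [hsp, hlo]
      · rw [show stepA (ans, ins) c = (ans ++ flushA ins ++ [String.ofList [c]], []) from by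
          simp only [stepA, flushA, if_neg hsp, hlo]; split_ifs <;> simp_all]
        rw [ih, gSpec]
        simp [hsp, hlo]

theorem gSpec_lower_run : ∀ (run : List Char), (∀ c ∈ run, PySem.Chars.islower c = true) →
    ∀ (ins cs : List Char), gSpec ins (run ++ cs) = gSpec (ins ++ run) cs := by
  intro run
  induction run with
  | nil => intro _ ins cs; simp
  | cons c r ih =>
    intro h ins cs
    have hc : PySem.Chars.islower c = true := h c (by simp)
    have hcsp : c ≠ ' ' := by intro he; rw [he] at hc; simp [PySem.Chars.islower] at hc
    rw [List.cons_append, gSpec]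
    simp only [if_neg hcsp, hc]
    rw [ih (fun d hd => h d (by simp [hd]))]
    simp

theorem gSpec_nonlower_run : ∀ (run : List Char), (∀ c ∈ run, PySem.Chars.islower c = false) →
    ∀ (cs : List Char), gSpec [] (run ++ cs) =
      (run.filter (fun c => c ≠ ' ')).map (fun c => String.ofList [c]) ++ gSpec [] cs := by
  intro run
  induction run with
  | nil => intro _ cs; simp
  | cons c r ih =>
    intro h cs
    have hc : PySem.Chars.islower c = false := h c (by simp)
    rw [List.cons_append, gSpec]
    by_cases hsp : c = ' '
    · rw [if_pos hsp]
      simp only [show flushA [] = [] from rfl, List.nil_append]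
      rw [ih (fun d hd => h d (by simp [hd]))]
      simp [hsp]
    · rw [if_neg hsp, if_neg (by rw [hc]; simp)]
      simp only [show flushA [] = [] from rfl, List.nil_append]
      rw [ih (fun d hd => h d (by simp [hd]))]
      simp [hsp]

theorem dropWhile_head_false {α : Type} (p : α → Bool) :
    ∀ (l : List α) (d : α) (t : List α), List.dropWhile p l = d :: t → p d = false := by
  intro l
  induction l with
  | nil => simp [List.dropWhile]
  | cons a l ih =>
    intro d t h
    rw [List.dropWhile_cons] at h
    split_ifs at h with hp
    · exact ih d t h
    · cases h; simpa using hp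

-- flushing commutes past a boundary: the next char (if any) is not lowercase
theorem gSpec_flush (ins cs : List Char)
    (h : cs = [] ∨ ∃ d t, cs = d :: t ∧ PySem.Chars.islower d = false) :
    gSpec ins cs = flushA ins ++ gSpec [] cs := by
  rcases h with h | ⟨d, t, rfl, hd⟩
  · subst h; simp [gSpec, flushA]
  · by_cases hsp : d = ' '
    · simp [gSpec, hsp, flushA]
    · simp [gSpec, hsp, hd, flushA]

-- one groupby group, consumed from the empty accumulator
theorem gSpec_group_cons (c : Char) (run rest' : List Char)
    (hall : ∀ d ∈ run, PySem.Chars.islower d = PySem.Chars.islower c)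
    (hbd : rest' = [] ∨ ∃ d t, rest' = d :: t ∧ PySem.Chars.islower d ≠ PySem.Chars.islower c) :
    gSpec [] (c :: (run ++ rest')) =
      pvEmit (PySem.Chars.islower c, c :: run) ++ gSpec [] rest' := by
  by_cases hcl : PySem.Chars.islower c = true
  · have hcsp : c ≠ ' ' := by intro he; rw [he] at hcl; simp [PySem.Chars.islower] at hcl
    rw [gSpec]
    simp only [if_neg hcsp, hcl, if_true, List.nil_append]
    rw [gSpec_lower_run run (fun d hd => (hall d hd).trans hcl) [c] rest']
    rw [gSpec_flush]
    · simp [pvEmit, flushA]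
    · rcases hbd with hb | ⟨d, t, ht, hd⟩
      · exact Or.inl hb
      · exact Or.inr ⟨d, t, ht, by rw [hcl] at hd; simpa using hd⟩
  · have hcf : PySem.Chars.islower c = false := by simpa using hcl
    rw [show (c :: (run ++ rest')) = (c :: run) ++ rest' from rfl]
    rw [gSpec_nonlower_run (c :: run)
      (fun d hd => by
        rcases List.mem_cons.mp hd with h | h
        · rw [h]; exact hcf
        · rw [hall d h]; exact hcf) rest']
    simp [pvEmit, hcf]

theorem gSpec_groups : ∀ (n : Nat) (l : List Char), l.length ≤ n →
    gSpec [] l = (pvGroups l).flatMap pvEmit := by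
  intro n
  induction n with
  | zero =>
    intro l hl
    have : l = [] := List.length_eq_zero_iff.mp (Nat.le_zero.mp hl)
    subst this; simp [gSpec, pvGroups, flushA]
  | succ n ih =>
    intro l hl
    match l with
    | [] => simp [gSpec, pvGroups, flushA]
    | c :: rest =>
      rw [pvGroups]
      have hsplit := (List.takeWhile_append_dropWhile
        (p := fun d => PySem.Chars.islower d == PySem.Chars.islower c) (l := rest)).symm
      have hlen : (rest.dropWhile (fun d => PySem.Chars.islower d == PySem.Chars.islower c)).length ≤ n := by
        have h1 := List.length_dropWhile_le (fun d => PySem.Chars.islower d == PySem.Chars.islower c) rest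
        have h2 : rest.length + 1 ≤ n + 1 := by simpa using hl
        omega
      have hall : ∀ d ∈ rest.takeWhile (fun d => PySem.Chars.islower d == PySem.Chars.islower c),
          PySem.Chars.islower d = PySem.Chars.islower c := by
        intro d hd; simpa using List.mem_takeWhile_imp hd
      have hbd : rest.dropWhile (fun d => PySem.Chars.islower d == PySem.Chars.islower c) = [] ∨
          ∃ d t, rest.dropWhile (fun d => PySem.Chars.islower d == PySem.Chars.islower c) = d :: t ∧
            PySem.Chars.islower d ≠ PySem.Chars.islower c := by
        cases hr : rest.dropWhile (fun d => PySem.Chars.islower d == PySem.Chars.islower c) with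
        | nil => exact Or.inl rfl
        | cons d t =>
          exact Or.inr ⟨d, t, rfl, by simpa using dropWhile_head_false _ rest d t hr⟩
      rw [show (c :: rest) = c :: (rest.takeWhile (fun d => PySem.Chars.islower d == PySem.Chars.islower c) ++
        rest.dropWhile (fun d => PySem.Chars.islower d == PySem.Chars.islower c)) from by rw [← hsplit]]
      rw [gSpec_group_cons c _ _ hall hbd, ih _ hlen]
      simp

-- ===== VERDICT (by name: the statement is the Claim_ definition above) =====
theorem dataSegmentation_spec : Claim_equal_dataSegmentation := by
  intro str _
  unfold Spec_dataSegmentation dataSegmentation dataSegmentation_alt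
  have := foldA_eq_gSpec str.toList [] []
  simp only [List.nil_append] at this
  rw [this, gSpec_groups str.toList.length str.toList le_rfl]
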